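-- pv_equiv track=rewrite | github.com/isavita/advent_generated | python/day18_part2_2018.py | count_resources
-- ===== SOURCE A (Python) =====
-- Trees = '|'
--
-- Lumberyard = '#'
--
-- def count_resources(grid):
--     wooded, lumberyards = 0, 0
--     for row in grid:
--         for acre in row:
--             if acre == Trees:
--                 wooded += 1
--             elif acre == Lumberyard:
--                 lumberyards += 1
--     return wooded, lumberyards
-- ===== SOURCE B (Python) =====
-- from bisect import bisect_left, bisect_right
--
--
-- def count_resources(grid):
--     acres = sorted(acre for row in grid for acre in row)
--     wooded = bisect_right(acres, '|') - bisect_left(acres, '|')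
--     lumberyards = bisect_right(acres, '#') - bisect_left(acres, '#')
--     return wooded, lumberyards
-- ===== Notes on version B (the rewrite author's own statement) =====
-- stated objective: alternative
-- what changed: B sorts the flattened grid once and obtains each count as the width of the equal-range located by binary search (bisect_right - bisect_left), instead of A's nested loops with two branch-updated accumulators.
import Mathlib
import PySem

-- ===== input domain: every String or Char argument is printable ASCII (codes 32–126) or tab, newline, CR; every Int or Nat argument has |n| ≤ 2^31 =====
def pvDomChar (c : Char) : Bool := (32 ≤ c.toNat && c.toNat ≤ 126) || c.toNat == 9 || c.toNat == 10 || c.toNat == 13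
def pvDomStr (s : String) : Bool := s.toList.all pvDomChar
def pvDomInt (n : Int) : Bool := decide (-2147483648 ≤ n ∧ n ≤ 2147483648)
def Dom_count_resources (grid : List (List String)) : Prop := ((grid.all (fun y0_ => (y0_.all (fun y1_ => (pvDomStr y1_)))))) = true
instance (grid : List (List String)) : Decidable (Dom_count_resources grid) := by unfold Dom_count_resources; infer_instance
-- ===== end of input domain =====

-- B sorts the flattened grid once and reads each count as the width of the bisect equal-range; an alternative algorithm, not faster.

-- ===== PORT A =====
def count_resources (grid : List (List String)) : Int × Int :=
  grid.foldl (fun (st : Int × Int) row =>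
    row.foldl (fun (st : Int × Int) acre =>
      if acre = "|" then (st.1 + 1, st.2)
      else if acre = "#" then (st.1, st.2 + 1)
      else st) st) (0, 0)

-- ===== PORT B =====
def count_resources_alt (grid : List (List String)) : Int × Int :=
  let acres := PySem.List.sorted grid.flatten (fun x => x) false
  let wooded : Int := (PySem.List.bisectRight acres "|" : Int) - (PySem.List.bisectLeft acres "|" : Int)
  let lumberyards : Int := (PySem.List.bisectRight acres "#" : Int) - (PySem.List.bisectLeft acres "#" : Int)
  (wooded, lumberyards)

-- ===== PRECONDITION & SPEC =====
def Spec_count_resources (grid : List (List String)) (out : Int × Int) : Prop := out = count_resources_alt grid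
instance (grid : List (List String)) (out : Int × Int) : Decidable (Spec_count_resources grid out) := by unfold Spec_count_resources; infer_instance

-- ===== CLAIM (what is proved, stated in full; the proofs are below) =====
def Claim_equal_count_resources : Prop := ∀ (grid : List (List String)), Dom_count_resources grid → Spec_count_resources grid (count_resources grid)

-- ===== LEMMAS AND PROOFS =====

-- A's nested fold computes the two member counts of the flattened grid.
theorem pv_foldl_count (l : List String) (w y : Int) :
    l.foldl (fun (st : Int × Int) acre =>
      if acre = "|" then (st.1 + 1, st.2)
      else if acre = "#" then (st.1, st.2 + 1)
      else st) (w, y)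
    = (w + l.count "|", y + l.count "#") := by
  induction l generalizing w y with
  | nil => simp
  | cons a t ih =>
    simp only [List.foldl_cons, List.count_cons]
    by_cases h1 : a = "|"
    · subst h1; simp [ih]; omega
    · by_cases h2 : a = "#"
      · subst h2; simp [ih, h1]; omega
      · simp [h1, h2, ih]

-- If exactly the first r elements satisfy p, then countP p = r.
theorem pv_countP_split (p : String → Bool) :
    ∀ (xs : List String) (r : Nat), r ≤ xs.length →
    (∀ (j : Nat) (hj : j < xs.length), j < r → p xs[j] = true) →
    (∀ (j : Nat) (hj : j < xs.length), r ≤ j → p xs[j] = false) →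
    xs.countP p = r := by
  intro xs
  induction xs with
  | nil => intro r hr _ _; simp only [List.countP_nil, List.length_nil] at hr ⊢; omega
  | cons a t ih =>
    intro r hr h1 h2
    cases r with
    | zero =>
      have ha : p a = false := h2 0 (by simp) (Nat.zero_le 0)
      rw [List.countP_cons_of_neg (by simp [ha])]
      exact ih 0 (Nat.zero_le _) (by intro j hj hlt; omega)
        (by intro j hj _; exact h2 (j+1) (by simpa using Nat.succ_lt_succ hj) (Nat.zero_le _))
    | succ s =>
      have ha : p a = true := h1 0 (by simp) (Nat.succ_pos s)
      rw [List.countP_cons_of_pos (by simp [ha])]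
      have := ih s (by simpa using Nat.succ_le_succ_iff.mp hr)
        (by intro j hj hlt; exact h1 (j+1) (by simpa using Nat.succ_lt_succ hj) (by omega))
        (by intro j hj hge; exact h2 (j+1) (by simpa using Nat.succ_lt_succ hj) (by omega))
      omega


-- sorted access is monotone
theorem pv_sorted_get_le (xs : List String) (h : xs.Pairwise (· ≤ ·))
    (i j : Nat) (hij : i ≤ j) (hj : j < xs.length) : xs[i]'(lt_of_le_of_lt hij hj) ≤ xs[j] := by
  rcases Nat.lt_or_ge i j with hlt | hge
  · exact (List.pairwise_iff_getElem.mp h) i j (lt_of_le_of_lt hij hj) hj hlt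
  · have : i = j := le_antisymm hij hge
    subst this; exact le_refl _

theorem pv_bisectLeftLoop_eq (xs : List String) (x : String) (hs : xs.Pairwise (· ≤ ·)) :
    ∀ (fuel lo hi : Nat), lo ≤ hi → hi ≤ xs.length → hi - lo ≤ fuel →
    (∀ (j : Nat) (hj : j < xs.length), j < lo → decide (xs[j] < x) = true) →
    (∀ (j : Nat) (hj : j < xs.length), hi ≤ j → decide (xs[j] < x) = false) →
    PySem.List.bisectLeftLoop xs x fuel lo hi = xs.countP (fun a => decide (a < x)) := by
  intro fuel
  induction fuel with
  | zero =>
    intro lo hi hlh hhl hf h1 h2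
    have : lo = hi := by omega
    subst this
    simp only [PySem.List.bisectLeftLoop]
    exact (pv_countP_split _ xs lo (le_trans hlh hhl) h1 (fun j hj hge => h2 j hj hge)).symm
  | succ fuel ih =>
    intro lo hi hlh hhl hf h1 h2
    by_cases hlt : lo < hi
    · have hmid : (lo + hi) / 2 < xs.length := by omega
      have hmlo : lo ≤ (lo + hi) / 2 := by omega
      have hmhi : (lo + hi) / 2 < hi := by omega
      simp only [PySem.List.bisectLeftLoop, if_pos hlt, List.getElem?_eq_getElem hmid]
      by_cases hy : xs[(lo + hi) / 2] < x
      · simp only [if_pos hy]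
        exact ih ((lo + hi) / 2 + 1) hi (by omega) hhl (by omega)
          (by intro j hj hjlt
              have : xs[j] ≤ xs[(lo + hi) / 2] := pv_sorted_get_le xs hs j _ (by omega) hmid
              simp [lt_of_le_of_lt this hy])
          h2
      · simp only [if_neg hy]
        exact ih lo ((lo + hi) / 2) (by omega) (by omega) (by omega) h1
          (by intro j hj hge
              have : xs[(lo + hi) / 2] ≤ xs[j] := pv_sorted_get_le xs hs _ j hge hj
              simp only [decide_eq_false_iff_not]
              intro hc
              exact hy (lt_of_lt_of_le (lt_of_le_of_lt this hc) (le_refl _)))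
    · have : lo = hi := by omega
      subst this
      simp only [PySem.List.bisectLeftLoop, if_neg hlt]
      exact (pv_countP_split _ xs lo (le_trans hlh hhl) h1 (fun j hj hge => h2 j hj hge)).symm

theorem pv_bisectRightLoop_eq (xs : List String) (x : String) (hs : xs.Pairwise (· ≤ ·)) :
    ∀ (fuel lo hi : Nat), lo ≤ hi → hi ≤ xs.length → hi - lo ≤ fuel →
    (∀ (j : Nat) (hj : j < xs.length), j < lo → decide (xs[j] ≤ x) = true) →
    (∀ (j : Nat) (hj : j < xs.length), hi ≤ j → decide (xs[j] ≤ x) = false) →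
    PySem.List.bisectRightLoop xs x fuel lo hi = xs.countP (fun a => decide (a ≤ x)) := by
  intro fuel
  induction fuel with
  | zero =>
    intro lo hi hlh hhl hf h1 h2
    have : lo = hi := by omega
    subst this
    simp only [PySem.List.bisectRightLoop]
    exact (pv_countP_split _ xs lo (le_trans hlh hhl) h1 (fun j hj hge => h2 j hj hge)).symm
  | succ fuel ih =>
    intro lo hi hlh hhl hf h1 h2
    by_cases hlt : lo < hi
    · have hmid : (lo + hi) / 2 < xs.length := by omega
      simp only [PySem.List.bisectRightLoop, if_pos hlt, List.getElem?_eq_getElem hmid]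
      by_cases hy : x < xs[(lo + hi) / 2]
      · simp only [if_pos hy]
        exact ih lo ((lo + hi) / 2) (by omega) (by omega) (by omega) h1
          (by intro j hj hge
              have : xs[(lo + hi) / 2] ≤ xs[j] := pv_sorted_get_le xs hs _ j hge hj
              simp only [decide_eq_false_iff_not]
              intro hc
              exact absurd (lt_of_lt_of_le hy this) (not_lt.mpr hc))
      · simp only [if_neg hy]
        exact ih ((lo + hi) / 2 + 1) hi (by omega) hhl (by omega)
          (by intro j hj hjlt
              have : xs[j] ≤ xs[(lo + hi) / 2] := pv_sorted_get_le xs hs j _ (by omega) hmid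
              simp [le_trans this (not_lt.mp hy)])
          h2
    · have : lo = hi := by omega
      subst this
      simp only [PySem.List.bisectRightLoop, if_neg hlt]
      exact (pv_countP_split _ xs lo (le_trans hlh hhl) h1 (fun j hj hge => h2 j hj hge)).symm

theorem pv_bisect_left (xs : List String) (x : String) (hs : xs.Pairwise (· ≤ ·)) :
    PySem.List.bisectLeft xs x = xs.countP (fun a => decide (a < x)) := by
  unfold PySem.List.bisectLeft
  exact pv_bisectLeftLoop_eq xs x hs xs.length 0 xs.length (Nat.zero_le _) (le_refl _) (by omega)
    (by intro j hj h; omega) (by intro j hj h; omega)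

theorem pv_bisect_right (xs : List String) (x : String) (hs : xs.Pairwise (· ≤ ·)) :
    PySem.List.bisectRight xs x = xs.countP (fun a => decide (a ≤ x)) := by
  unfold PySem.List.bisectRight
  exact pv_bisectRightLoop_eq xs x hs xs.length 0 xs.length (Nat.zero_le _) (le_refl _) (by omega)
    (by intro j hj h; omega) (by intro j hj h; omega)

theorem pv_countP_le_split (xs : List String) (x : String) :
    xs.countP (fun a => decide (a ≤ x)) = xs.countP (fun a => decide (a < x)) + xs.count x := by
  induction xs with
  | nil => simp
  | cons a t ih =>
    rcases lt_trichotomy a x with h | h | h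
    · rw [List.countP_cons_of_pos (by simp [le_of_lt h]),
        List.countP_cons_of_pos (by simp [h]),
        List.count_cons_of_ne (by exact fun hc => absurd hc (ne_of_lt h))]
      omega
    · subst h
      rw [List.countP_cons_of_pos (by simp),
        List.countP_cons_of_neg (by simp), List.count_cons_self]
      omega
    · rw [List.countP_cons_of_neg (by simp [not_le.mpr h]),
        List.countP_cons_of_neg (by simp [not_lt.mpr (le_of_lt h)]),
        List.count_cons_of_ne (by exact fun hc => absurd hc (ne_of_gt h))]
      omega

-- On a sorted list, the equal-range width is the count.
theorem pv_bisect_count (xs : List String) (x : String) (hs : xs.Pairwise (· ≤ ·)) :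
    (PySem.List.bisectRight xs x : Int) - (PySem.List.bisectLeft xs x : Int) = (xs.count x : Int) := by
  rw [pv_bisect_left xs x hs, pv_bisect_right xs x hs, pv_countP_le_split]
  push_cast
  ring

-- ===== VERDICT (by name: the statement is the Claim_ definition above) =====
theorem count_resources_spec : Claim_equal_count_resources := by
  intro grid _
  unfold Spec_count_resources count_resources count_resources_alt
  rw [← List.foldl_flatten, pv_foldl_count]
  have hs : (PySem.List.sorted grid.flatten (fun x => x) false).Pairwise (· ≤ ·) :=
    PySem.List.sorted_pairwise grid.flatten (fun x => x)
  have hperm := PySem.List.sorted_perm grid.flatten (fun x : String => x) false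
  simp only [pv_bisect_count _ _ hs, hperm.count_eq]
  simp
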